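-- pv_equiv track=rewrite | github.com/kyug3/my-atcoder | funcs/mat_pow.py | matpow
-- ===== SOURCE A (Python) =====
-- mod = 998244353
--
-- def matpow(A, B, w):
--     l = len(A)
--     while w:
--         if w & 1:
--             C = [0] * l
--             for i in range(l):
--                 for j in range(l):
--                     C[i] += A[i][j] * B[j]
--                     C[i] %= mod
--             B = C
--
--         C = [[0] * l for _ in range(l)]
--         for i in range(l):
--             for j in range(l):
--                 for k in range(l):
--                     C[i][j] += A[i][k] * A[k][j]
--                     C[i][j] %= mod
--         A = C
--         w >>= 1
--     return B
-- ===== SOURCE B (Python) =====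
-- mod = 998244353
--
-- def _matmul(X, Y, l):
--     return [[sum(X[i][k] * Y[k][j] for k in range(l)) % mod for j in range(l)] for i in range(l)]
--
-- def matpow(A, B, w):
--     if w == 0:
--         return B
--     l = len(A)
--     M = [[int(i == j) for j in range(l)] for i in range(l)]
--     P = A
--     n = w
--     while n:
--         if n & 1:
--             M = _matmul(M, P, l)
--         P = _matmul(P, P, l)
--         n >>= 1
--     return [sum(M[i][k] * B[k] for k in range(l)) % mod for i in range(l)]
-- ===== Notes on version B (the rewrite author's own statement) =====
-- stated objective: alternative
-- what changed: Instead of interleaving the vector update with the squaring inside one while-loop over mutable accumulator lists, B first builds the matrix power M = A^w mod p by binary exponentiation starting from the identity (with a sum-comprehension matmul that reduces once per entry) and then applies M to B in a single matrix-vector product, special-casing w == 0 where the original returns B with no modular reduction.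
import Mathlib
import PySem

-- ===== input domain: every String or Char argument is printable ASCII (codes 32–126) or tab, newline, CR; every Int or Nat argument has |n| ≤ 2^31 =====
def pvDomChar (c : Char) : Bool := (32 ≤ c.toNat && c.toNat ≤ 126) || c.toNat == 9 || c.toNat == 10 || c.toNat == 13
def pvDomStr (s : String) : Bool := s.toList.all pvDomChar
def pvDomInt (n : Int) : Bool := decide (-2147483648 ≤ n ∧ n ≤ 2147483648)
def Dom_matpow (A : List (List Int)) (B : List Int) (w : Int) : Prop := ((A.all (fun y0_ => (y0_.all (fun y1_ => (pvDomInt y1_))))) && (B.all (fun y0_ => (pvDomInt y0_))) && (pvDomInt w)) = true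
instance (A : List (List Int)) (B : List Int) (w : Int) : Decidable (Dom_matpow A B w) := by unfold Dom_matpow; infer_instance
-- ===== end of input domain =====

-- B builds the matrix power A^w mod p by binary exponentiation from the identity and applies it
-- to B in one matrix-vector product (sum-comprehension, one reduction per entry), instead of A's
-- interleaved vector updates and in-place accumulator loops; same asymptotic cost (alternative).

-- ===== PORT A =====
def pvM : Int := 998244353

-- X[i][j], with default 0 out of range (Python raises there; excluded by Pre_matpow)
def pvGet2 (X : List (List Int)) (i j : Nat) : Int := (X.getD i []).getD j 0

-- the 'if w & 1' body: C = [0]*l; C[i] += A[i][j]*B[j]; C[i] %= mod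
def pvMvecA (A : List (List Int)) (B : List Int) (l : Nat) : List Int :=
  (List.range l).foldl
    (fun C i => C.set i ((List.range l).foldl
        (fun c j => (c + pvGet2 A i j * B.getD j 0) % pvM) (C.getD i 0)))
    (List.replicate l 0)

-- the squaring: C[i][j] += A[i][k]*A[k][j]; C[i][j] %= mod
def pvMsqA (A : List (List Int)) (l : Nat) : List (List Int) :=
  (List.range l).foldl
    (fun C i => C.set i ((List.range l).foldl
      (fun R j => R.set j ((List.range l).foldl
          (fun c k => (c + pvGet2 A i k * pvGet2 A k j) % pvM) (R.getD j 0)))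
      (C.getD i [])))
    (List.replicate l (List.replicate l 0))

-- the while-loop over w (w ≥ 0 under Pre_matpow; w >>= 1 is n / 2)
def matpowGo (A : List (List Int)) (B : List Int) (l : Nat) (n : Nat) : List Int :=
  if n = 0 then B
  else matpowGo (pvMsqA A l) (if n % 2 = 1 then pvMvecA A B l else B) l (n / 2)
  termination_by n
  decreasing_by omega

def matpow (A : List (List Int)) (B : List Int) (w : Int) : List Int :=
  matpowGo A B A.length w.toNat

-- ===== PORT B =====
-- _matmul(X, Y, l): sum comprehension, one % per entry
def pvMmulB (X Y : List (List Int)) (l : Nat) : List (List Int) :=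
  (List.range l).map fun i => (List.range l).map fun j =>
    ((List.range l).map fun k => pvGet2 X i k * pvGet2 Y k j).sum % pvM

-- the while-loop: state (M, P, n)
def pvBinGo (M P : List (List Int)) (l : Nat) (n : Nat) : List (List Int) :=
  if n = 0 then M
  else pvBinGo (if n % 2 = 1 then pvMmulB M P l else M) (pvMmulB P P l) l (n / 2)
  termination_by n
  decreasing_by omega

def matpow_alt (A : List (List Int)) (B : List Int) (w : Int) : List Int :=
  if w = 0 then B
  else
    let l := A.length
    let M := pvBinGo ((List.range l).map fun i => (List.range l).map fun j =>
                        if i = j then (1 : Int) else 0) A l w.toNat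
    (List.range l).map fun i =>
      ((List.range l).map fun k => pvGet2 M i k * B.getD k 0).sum % pvM

-- ===== PRECONDITION & SPEC =====
-- Pre_ excludes w < 0 (both while-loops never terminate there) and, for w > 0, matrices with a
-- row shorter than len(A) or B shorter than len(A), on which the Python raises IndexError.
def Pre_matpow (A : List (List Int)) (B : List Int) (w : Int) : Prop :=
  0 ≤ w ∧ (w = 0 ∨ ((∀ row ∈ A, A.length ≤ row.length) ∧ A.length ≤ B.length))
instance (A : List (List Int)) (B : List Int) (w : Int) : Decidable (Pre_matpow A B w) := by
  unfold Pre_matpow; infer_instance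

def pvWitness_matpow : List (List Int) × List Int × Int := ([[1, 2], [3, 4]], [5, 6], 3)

def Spec_matpow (A : List (List Int)) (B : List Int) (w : Int) (out : List Int) : Prop := out = matpow_alt A B w
instance (A : List (List Int)) (B : List Int) (w : Int) (out : List Int) : Decidable (Spec_matpow A B w out) := by unfold Spec_matpow; infer_instance

-- ===== CLAIM (what is proved, stated in full; the proofs are below) =====
def Claim_equal_matpow : Prop := ∀ (A : List (List Int)) (B : List Int) (w : Int), Dom_matpow A B w → Pre_matpow A B w → Spec_matpow A B w (matpow A B w)

-- ===== LEMMAS AND PROOFS =====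
def pvN : ℕ := 998244353

-- semantic bridges into ZMod pvN
def pvTm (l : Nat) (X : List (List Int)) : Matrix (Fin l) (Fin l) (ZMod pvN) :=
  Matrix.of fun i j => ((pvGet2 X i j : Int) : ZMod pvN)

def pvTv (l : Nat) (B : List Int) : Fin l → ZMod pvN :=
  fun k => ((B.getD k 0 : Int) : ZMod pvN)

def pvOut (l : Nat) (u : Fin l → ZMod pvN) : List Int :=
  (List.range l).map fun i => if h : i < l then ((u ⟨i, h⟩).val : Int) else 0

theorem pvM_eq : pvM = (pvN : Int) := by unfold pvM pvN; norm_num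

theorem pvNeZero : NeZero pvN := ⟨by unfold pvN; norm_num⟩

-- list-range sum = Finset.range sum
theorem pvSum_range {M : Type} [AddCommMonoid M] (f : ℕ → M) (n : ℕ) :
    ((List.range n).map f).sum = ∑ k ∈ Finset.range n, f k := by
  induction n with
  | zero => simp
  | succ n ih => rw [List.range_succ, Finset.sum_range_succ, List.map_append, List.sum_append, ih]; simp

-- the C[i] += t; C[i] %= mod accumulation equals one reduction of the sum
theorem pvFoldl_addmod (f : ℕ → Int) (ts : List ℕ) (c : Int) (hc : c % pvM = c) :
    ts.foldl (fun c j => (c + f j) % pvM) c = (c + (ts.map f).sum) % pvM := by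
  induction ts generalizing c with
  | nil => simpa using hc.symm
  | cons t ts ih =>
      simp only [List.foldl_cons, List.map_cons, List.sum_cons]
      rw [ih _ (Int.emod_emod_of_dvd _ dvd_rfl), Int.emod_add_emod]
      congr 1
      ring

-- the 'C = [0]*l; for i: C[i] = f(i, C[i])' pattern
theorem pvFoldl_set_range {α : Type} (f : ℕ → α → α) (d init : α) (l : ℕ) :
    (List.range l).foldl (fun C i => C.set i (f i (C.getD i d))) (List.replicate l init)
      = (List.range l).map fun i => f i init := by
  suffices h : ∀ j ≤ l, (List.range j).foldl (fun C i => C.set i (f i (C.getD i d))) (List.replicate l init)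
      = ((List.range j).map fun i => f i init) ++ List.replicate (l - j) init by
    simpa using h l le_rfl
  intro j hj
  induction j with
  | zero => simp
  | succ j ih =>
      have hj' : j < l := hj
      rw [List.range_succ, List.foldl_append, List.map_append, ih (le_of_lt hj')]
      have hlen : ((List.range j).map fun i => f i init).length = j := by simp
      have hrep' : l - j = (l - (j + 1)) + 1 := by omega
      simp only [List.foldl_cons, List.foldl_nil]
      rw [List.getD_eq_getElem?_getD, List.getElem?_append_right (le_of_eq hlen), hlen,
        Nat.sub_self, List.getElem?_replicate, if_pos (by omega : 0 < l - j), Option.getD_some]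
      rw [List.set_append, hlen, if_neg (lt_irrefl j), Nat.sub_self, hrep',
        List.replicate_succ, List.set_cons_zero]
      simp

-- closed forms of A's inner loops
theorem pvMvecA_eq (A : List (List Int)) (B : List Int) (l : Nat) :
    pvMvecA A B l = (List.range l).map fun i =>
      ((List.range l).map fun j => pvGet2 A i j * B.getD j 0).sum % pvM := by
  unfold pvMvecA
  rw [pvFoldl_set_range (fun i c => (List.range l).foldl (fun c j => (c + pvGet2 A i j * B.getD j 0) % pvM) c) 0 0 l]
  refine List.map_congr_left fun i _ => ?_
  rw [pvFoldl_addmod (fun j => pvGet2 A i j * B.getD j 0) (List.range l) 0 (by decide)]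
  simp

theorem pvMsqA_eq (A : List (List Int)) (l : Nat) :
    pvMsqA A l = (List.range l).map fun i => (List.range l).map fun j =>
      ((List.range l).map fun k => pvGet2 A i k * pvGet2 A k j).sum % pvM := by
  unfold pvMsqA
  rw [pvFoldl_set_range (fun i R => (List.range l).foldl
        (fun R j => R.set j ((List.range l).foldl
          (fun c k => (c + pvGet2 A i k * pvGet2 A k j) % pvM) (R.getD j 0))) R)
      [] (List.replicate l 0) l]
  refine List.map_congr_left fun i _ => ?_
  rw [pvFoldl_set_range (fun j c => (List.range l).foldl (fun c k => (c + pvGet2 A i k * pvGet2 A k j) % pvM) c) 0 0 l]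
  refine List.map_congr_left fun j _ => ?_
  rw [pvFoldl_addmod (fun k => pvGet2 A i k * pvGet2 A k j) (List.range l) 0 (by decide)]
  simp

-- entry of a map-map-over-range matrix
theorem pvGet2_map_range (g : ℕ → ℕ → Int) (l i j : ℕ) (hi : i < l) (hj : j < l) :
    pvGet2 ((List.range l).map fun i => (List.range l).map fun j => g i j) i j = g i j := by
  simp [pvGet2, List.getD_eq_getElem?_getD, List.getElem?_map, List.getElem?_range hi,
    List.getElem?_range hj]

-- cast of a reduced dot product as a Fin-indexed sum
theorem pvDotBridge (f g : ℕ → Int) (l : ℕ) :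
    ((((List.range l).map fun k => f k * g k).sum % pvM : Int) : ZMod pvN)
      = ∑ k : Fin l, ((f k : Int) : ZMod pvN) * ((g k : Int) : ZMod pvN) := by
  rw [pvM_eq, ZMod.intCast_mod, pvSum_range (fun k => f k * g k) l,
    Fin.sum_univ_eq_sum_range (fun k => ((f k : Int) : ZMod pvN) * ((g k : Int) : ZMod pvN)) l]
  push_cast
  rfl

theorem pvTm_mmulB (X Y : List (List Int)) (l : Nat) :
    pvTm l (pvMmulB X Y l) = pvTm l X * pvTm l Y := by
  ext i j
  simp only [pvTm, pvMmulB, Matrix.mul_apply, Matrix.of_apply]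
  rw [pvGet2_map_range _ l i j i.isLt j.isLt]
  exact pvDotBridge (fun k => pvGet2 X i k) (fun k => pvGet2 Y k j) l

theorem pvTm_msq (A : List (List Int)) (l : Nat) :
    pvTm l (pvMsqA A l) = pvTm l A * pvTm l A := by
  ext i j
  rw [pvMsqA_eq]
  simp only [pvTm, Matrix.mul_apply, Matrix.of_apply]
  rw [pvGet2_map_range _ l i j i.isLt j.isLt]
  exact pvDotBridge (fun k => pvGet2 A i k) (fun k => pvGet2 A k j) l

theorem pvTm_id (l : Nat) :
    pvTm l ((List.range l).map fun i => (List.range l).map fun j => if i = j then (1 : Int) else 0) = 1 := by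
  ext i j
  unfold pvTm
  simp only [Matrix.of_apply]
  rw [pvGet2_map_range _ l i j i.isLt j.isLt, Matrix.one_apply]
  by_cases h : (i : ℕ) = (j : ℕ)
  · simp [h, Fin.ext_iff]
  · simp [h, Fin.ext_iff]

-- a reduced dot-product list is pvOut of the semantic matrix-vector product
theorem pvDot_out (M : List (List Int)) (B : List Int) (l : Nat) :
    ((List.range l).map fun i => ((List.range l).map fun k => pvGet2 M i k * B.getD k 0).sum % pvM)
      = pvOut l ((pvTm l M).mulVec (pvTv l B)) := by
  haveI := pvNeZero
  unfold pvOut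
  refine List.map_congr_left fun i hi => ?_
  rw [List.mem_range] at hi
  rw [dif_pos hi]
  have hval : (((pvTm l M).mulVec (pvTv l B)) ⟨i, hi⟩ : ZMod pvN)
      = ((((List.range l).map fun k => pvGet2 M i k * B.getD k 0).sum % pvM : Int) : ZMod pvN) :=
    calc ((pvTm l M).mulVec (pvTv l B)) ⟨i, hi⟩
        = ∑ k : Fin l, ((pvGet2 M i k : Int) : ZMod pvN) * ((B.getD (k : ℕ) 0 : Int) : ZMod pvN) := by
          simp [Matrix.mulVec, dotProduct, pvTm, pvTv]
      _ = _ := (pvDotBridge (fun k => pvGet2 M i k) (fun k => B.getD k 0) l).symm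
  rw [hval, ZMod.val_intCast, ← pvM_eq, Int.emod_emod_of_dvd _ dvd_rfl]

theorem pvMvecA_out (A : List (List Int)) (B : List Int) (l : Nat) :
    pvMvecA A B l = pvOut l ((pvTm l A).mulVec (pvTv l B)) := by
  rw [pvMvecA_eq, pvDot_out]

-- pvTv recovers the semantic vector from pvOut
theorem pvTv_out (l : Nat) (u : Fin l → ZMod pvN) : pvTv l (pvOut l u) = u := by
  haveI := pvNeZero
  funext k
  unfold pvTv pvOut
  rw [List.getD_eq_getElem?_getD, List.getElem?_map, List.getElem?_range k.isLt]
  simp only [Option.map_some, Option.getD_some, dif_pos k.isLt, Fin.eta]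
  push_cast
  exact ZMod.natCast_rightInverse (u k)

-- A's loop computes pvOut of (A^n) · B for every n ≥ 1
theorem pvLoopA (l : Nat) :
    ∀ n, 1 ≤ n → ∀ (A : List (List Int)) (B : List Int),
      matpowGo A B l n = pvOut l (((pvTm l A) ^ n).mulVec (pvTv l B)) := by
  intro n
  induction n using Nat.strong_induction_on with
  | _ n ih =>
    intro hn A B
    rw [matpowGo, if_neg (by omega)]
    by_cases h1 : n = 1
    · subst h1
      rw [matpowGo]
      simp [pvMvecA_out]
    · have h2 : 2 ≤ n := by omega
      rw [ih (n / 2) (by omega) (by omega)]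
      rw [pvTm_msq]
      rcases Nat.even_or_odd n with he | ho
      · have hb : ¬ n % 2 = 1 := by have := Nat.even_iff.mp he; omega
        rw [if_neg hb]
        have : (pvTm l A * pvTm l A) ^ (n / 2) = (pvTm l A) ^ n := by
          rw [← pow_two, ← pow_mul]
          congr 1
          omega
        rw [this]
      · have hb : n % 2 = 1 := Nat.odd_iff.mp ho
        rw [if_pos hb, pvMvecA_out, pvTv_out, Matrix.mulVec_mulVec]
        have : (pvTm l A * pvTm l A) ^ (n / 2) * pvTm l A = (pvTm l A) ^ n := by
          rw [← pow_two, ← pow_mul, ← pow_succ]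
          congr 1
          omega
        rw [this]

-- B's loop invariant: binGo M P n represents M · P^n
theorem pvBinGoInv (l : Nat) :
    ∀ n (M P : List (List Int)),
      pvTm l (pvBinGo M P l n) = pvTm l M * (pvTm l P) ^ n := by
  intro n
  induction n using Nat.strong_induction_on with
  | _ n ih =>
    intro M P
    rw [pvBinGo]
    by_cases h0 : n = 0
    · subst h0; simp
    · rw [if_neg h0, ih (n / 2) (by omega), pvTm_mmulB]
      rcases Nat.even_or_odd n with he | ho
      · have hb : ¬ n % 2 = 1 := by have := Nat.even_iff.mp he; omega
        rw [if_neg hb, ← pow_two, ← pow_mul]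
        congr 2
        omega
      · have hb : n % 2 = 1 := Nat.odd_iff.mp ho
        rw [if_pos hb, pvTm_mmulB, ← pow_two, ← pow_mul, mul_assoc, ← pow_succ']
        congr 2
        omega

-- ===== VERDICT (by name: the statement is the Claim_ definition above) =====
theorem matpow_spec : Claim_equal_matpow := by
  intro A B w _ hpre
  unfold Spec_matpow
  obtain ⟨hw, -⟩ := hpre
  by_cases h0 : w = 0
  · subst h0
    unfold matpow matpow_alt
    rw [matpowGo]
    simp
  · have hn : 1 ≤ w.toNat := by omega
    unfold matpow matpow_alt
    rw [if_neg h0, pvLoopA A.length w.toNat hn A B, pvDot_out, pvBinGoInv, pvTm_id, one_mul]
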